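-- pv_equiv track=rewrite | github.com/JimMarshall35/riscv-forth | scripts/Compiler.py | escape_for_gas_macro_arg
-- ===== SOURCE A (Python) =====
-- def escape_for_gas_macro_arg(s):
--     ns = ""
--     for c in s:
--         if c == '!':
--             ns += '!!'
--         elif c == '<':
--             ns += '!<'
--         elif c == '>':
--             ns += '!>'
--         elif c == ':':
--             ns += '!:'
--         elif c == ',':
--             ns += '!,'
--         elif c == ';':
--             ns += '!;'
--         else:
--             ns += c
--     return ns
-- ===== SOURCE B (Python) =====
-- def escape_for_gas_macro_arg(s):
--     # Stage 1: double every '!' first (so escapes introduced later are not re-escaped),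
--     # then one whole-string replace pass per remaining special character.
--     s = s.replace('!', '!!')
--     for ch in '<>:,;':
--         s = s.replace(ch, '!' + ch)
--     return s
-- ===== Notes on version B (the rewrite author's own statement) =====
-- stated objective: faster
-- what changed: Replaces A's single per-character accumulate loop with a six-way branch by six staged whole-string C-level replace passes ('!' doubled first, then each special character prefixed with '!'), correct because later passes never re-escape characters earlier passes introduced.
import Mathlib
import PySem

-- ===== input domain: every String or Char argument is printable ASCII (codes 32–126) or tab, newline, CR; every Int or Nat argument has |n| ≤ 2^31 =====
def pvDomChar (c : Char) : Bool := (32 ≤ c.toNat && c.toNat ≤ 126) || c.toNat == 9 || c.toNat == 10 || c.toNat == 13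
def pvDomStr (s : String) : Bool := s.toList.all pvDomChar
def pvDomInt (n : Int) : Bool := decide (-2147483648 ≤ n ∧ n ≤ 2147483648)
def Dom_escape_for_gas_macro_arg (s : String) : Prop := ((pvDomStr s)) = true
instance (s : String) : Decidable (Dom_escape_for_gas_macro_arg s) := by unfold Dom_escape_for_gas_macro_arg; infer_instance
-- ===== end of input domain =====

-- B replaces A's single accumulate loop with a six-way branch chain by six staged
-- whole-string replace passes ('!' doubled first, then each other special character
-- prefixed with '!'); an alternative staged decomposition of the same task.

-- ===== PORT A =====
-- literal transliteration of A's loop: accumulator string, branch chain per character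
def escape_for_gas_macro_arg (s : String) : String :=
  s.toList.foldl (fun ns c =>
    if c = '!' then ns ++ "!!"
    else if c = '<' then ns ++ "!<"
    else if c = '>' then ns ++ "!>"
    else if c = ':' then ns ++ "!:"
    else if c = ',' then ns ++ "!,"
    else if c = ';' then ns ++ "!;"
    else ns ++ c.toString) ""

-- ===== PORT B =====
-- Source B: s = s.replace('!','!!'); then for ch in '<>:,;': s = s.replace(ch, '!'+ch)
def escape_for_gas_macro_arg_alt (s : String) : String :=
  "<>:,;".toList.foldl
    (fun t ch => PySem.Str.replace t (String.ofList [ch]) (String.ofList ['!', ch]))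
    (PySem.Str.replace s "!" "!!")

-- ===== PRECONDITION & SPEC =====
def Spec_escape_for_gas_macro_arg (s : String) (out : String) : Prop := out = escape_for_gas_macro_arg_alt s
instance (s : String) (out : String) : Decidable (Spec_escape_for_gas_macro_arg s out) := by unfold Spec_escape_for_gas_macro_arg; infer_instance

-- ===== CLAIM (what is proved, stated in full; the proofs are below) =====
def Claim_equal_escape_for_gas_macro_arg : Prop := ∀ (s : String), Dom_escape_for_gas_macro_arg s → Spec_escape_for_gas_macro_arg s (escape_for_gas_macro_arg s)

-- ===== LEMMAS AND PROOFS =====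

-- the combined escape map, the common normal form of both programs
def pvEsc (c : Char) : List Char :=
  if c = '!' then ['!', '!']
  else if c = '<' then ['!', '<']
  else if c = '>' then ['!', '>']
  else if c = ':' then ['!', ':']
  else if c = ',' then ['!', ',']
  else if c = ';' then ['!', ';']
  else [c]

-- single-char replacement as a flatMap
def pvSub (c : Char) (new : List Char) (x : Char) : List Char :=
  if x = c then new else [x]

-- replace.go with single-char pattern and fuel = length is a flatMap
theorem pvGo_eq (c : Char) (new : List Char) :
    ∀ (l acc : List Char),
      PySem.Chars.replace.go [c] new l.length l acc
        = acc.reverse ++ l.flatMap (pvSub c new) := by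
  intro l
  induction l with
  | nil => intro acc; simp [PySem.Chars.replace.go]
  | cons x t ih =>
      intro acc
      rw [show (x :: t).length = t.length + 1 from rfl]
      by_cases h : x = c
      · have hp : List.isPrefixOf [c] (x :: t) = true := by
          simp [List.isPrefixOf]
          exact h.symm
        rw [show PySem.Chars.replace.go [c] new (t.length + 1) (x :: t) acc
              = PySem.Chars.replace.go [c] new t.length ((x :: t).drop 1)
                  (new.reverse ++ acc) by
          simp [PySem.Chars.replace.go, hp]]
        simp only [List.drop_one, List.tail_cons]
        rw [ih]
        simp [pvSub, h]
      · have hp : List.isPrefixOf [c] (x :: t) = false := by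
          simp [List.isPrefixOf]
          exact fun hc => absurd hc.symm h
        rw [show PySem.Chars.replace.go [c] new (t.length + 1) (x :: t) acc
              = PySem.Chars.replace.go [c] new t.length t (x :: acc) by
          simp [PySem.Chars.replace.go, hp]]
        rw [ih]
        simp [pvSub, h]

-- Python replace with a one-character pattern is a flatMap over the string
theorem pvReplace_single (c : Char) (new l : List Char) :
    PySem.Chars.replace l [c] new = l.flatMap (pvSub c new) := by
  rw [show PySem.Chars.replace l [c] new
        = PySem.Chars.replace.go [c] new l.length l [] by
      simp [PySem.Chars.replace]]
  rw [pvGo_eq]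
  simp

-- one step of A's branch chain appends exactly the combined escape of c
theorem pvStepA (ns : String) (c : Char) :
    (if c = '!' then ns ++ "!!"
     else if c = '<' then ns ++ "!<"
     else if c = '>' then ns ++ "!>"
     else if c = ':' then ns ++ "!:"
     else if c = ',' then ns ++ "!,"
     else if c = ';' then ns ++ "!;"
     else ns ++ c.toString) = ns ++ String.ofList (pvEsc c) := by
  unfold pvEsc
  split_ifs <;> rfl

-- A's fold from accumulator acc equals acc ++ the flatMap normal form
theorem pvFoldA (l : List Char) : ∀ (acc : String),
    l.foldl (fun ns c =>
      if c = '!' then ns ++ "!!"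
      else if c = '<' then ns ++ "!<"
      else if c = '>' then ns ++ "!>"
      else if c = ':' then ns ++ "!:"
      else if c = ',' then ns ++ "!,"
      else if c = ';' then ns ++ "!;"
      else ns ++ c.toString) acc
    = acc ++ String.ofList (l.flatMap pvEsc) := by
  induction l with
  | nil =>
      intro acc
      simp
  | cons c t ih =>
      intro acc
      rw [List.foldl_cons, pvStepA, ih, List.flatMap_cons]
      rw [String.ofList_append]
      rw [String.append_assoc]

-- B's five staged passes after the '!' pass, as one flatMap of the combined map
theorem pvChainB (l : List Char) :
    (((((l.flatMap (pvSub '!' ['!', '!'])).flatMap (pvSub '<' ['!', '<'])).flatMap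
        (pvSub '>' ['!', '>'])).flatMap (pvSub ':' ['!', ':'])).flatMap
        (pvSub ',' ['!', ','])).flatMap (pvSub ';' ['!', ';'])
    = l.flatMap pvEsc := by
  induction l with
  | nil => rfl
  | cons c t ih =>
      simp only [List.flatMap_cons, List.flatMap_append, ih]
      congr 1
      by_cases h1 : c = '!'
      · simp [pvSub, pvEsc, h1]
      · by_cases h2 : c = '<'
        · simp [pvSub, pvEsc, h2]
        · by_cases h3 : c = '>'
          · simp [pvSub, pvEsc, h3]
          · by_cases h4 : c = ':'
            · simp [pvSub, pvEsc, h4]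
            · by_cases h5 : c = ','
              · simp [pvSub, pvEsc, h5]
              · by_cases h6 : c = ';'
                · simp [pvSub, pvEsc, h6]
                · simp [pvSub, pvEsc, h1, h2, h3, h4, h5, h6]

-- B's whole pipeline equals the flatMap normal form
theorem pvAltEq (s : String) :
    escape_for_gas_macro_arg_alt s = String.ofList (s.toList.flatMap pvEsc) := by
  unfold escape_for_gas_macro_arg_alt
  rw [show "<>:,;".toList = ['<', '>', ':', ',', ';'] from rfl]
  simp only [List.foldl_cons, List.foldl_nil]
  simp only [PySem.Str.replace]
  rw [show ("!" : String).toList = ['!'] from rfl]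
  rw [show ("!!" : String).toList = ['!', '!'] from rfl]
  simp only [String.toList_ofList]
  rw [pvReplace_single, pvReplace_single, pvReplace_single, pvReplace_single,
    pvReplace_single, pvReplace_single, pvChainB]

-- ===== VERDICT (by name: the statement is the Claim_ definition above) =====
theorem escape_for_gas_macro_arg_spec : Claim_equal_escape_for_gas_macro_arg := by
  intro s _
  unfold Spec_escape_for_gas_macro_arg escape_for_gas_macro_arg
  rw [pvAltEq, pvFoldA]
  simp
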